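-- pv_equiv track=rewrite | github.com/roa5108/Algorithm | 프로그래머스/1/12977. 소수 만들기/소수 만들기.py | solution
-- ===== SOURCE A (Python) =====
-- def solution(nums):
--     answer = 0
--
--     from itertools import combinations
--     comb=list(combinations(nums,3))
--     sum_comb=[sum(x) for x in comb]
--
--     def is_Prime(n):
--         if n<2:
--             return False
--         for i in range(2,int(n**0.5)+1):
--             if n%i==0:
--                 return False
--         return True
--
--     return sum(1 for i in sum_comb if is_Prime(i))
-- ===== SOURCE B (Python) =====
-- def solution(nums):
--     def is_prime(n):
--         if n < 2:
--             return False
--         d = 2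
--         while d * d <= n:
--             if n % d == 0:
--                 return False
--             d += 1
--         return True
--
--     def count_k(i, k, acc):
--         # number of k-element combinations of nums[i:] whose sum plus acc is prime
--         if k == 0:
--             return 1 if is_prime(acc) else 0
--         total = 0
--         for j in range(i, len(nums) - k + 1):
--             total += count_k(j + 1, k - 1, acc + nums[j])
--         return total
--
--     return count_k(0, 3, 0)
-- ===== Notes on version B (the rewrite author's own statement) =====
-- stated objective: alternative
-- what changed: Replaces materialising the full combinations list, the per-tuple sum() list and the range-over-floating-sqrt trial division by a recursive backtracking count over start indices that carries the partial sum and a while-loop primality test (d*d <= n), avoiding the intermediate tuple/list allocations.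
import Mathlib
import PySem

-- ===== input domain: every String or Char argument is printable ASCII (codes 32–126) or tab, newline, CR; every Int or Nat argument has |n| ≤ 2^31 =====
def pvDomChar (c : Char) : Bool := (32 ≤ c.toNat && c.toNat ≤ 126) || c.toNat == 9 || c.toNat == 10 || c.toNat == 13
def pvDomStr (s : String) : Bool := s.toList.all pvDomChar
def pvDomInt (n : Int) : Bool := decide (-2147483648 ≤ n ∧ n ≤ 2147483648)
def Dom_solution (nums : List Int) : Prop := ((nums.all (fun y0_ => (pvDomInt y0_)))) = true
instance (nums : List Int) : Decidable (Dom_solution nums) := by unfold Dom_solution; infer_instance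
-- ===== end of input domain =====

-- B changes the decomposition (recursive backtracking over start indices with a carried partial
-- sum instead of materialised combination/sum lists; while d*d<=n instead of
-- range(2,int(n**0.5)+1)); same cost.

-- ===== PORT A =====
-- for i in range(2, int(n**0.5)+1): if n%i==0: return False
def aPrimeLoop (n : Int) : List Int → Bool
  | [] => true
  | i :: rest => if n % i == 0 then false else aPrimeLoop n rest

-- int(n**0.5): on this domain (2 ≤ n ≤ 3·2^31 < 2^53) the float value int(n**0.5) equals
-- Nat.sqrt n, except that for n = k²-1 it may be k — one extra loop index that never
-- divides n (k | k²-1 only for k = 1), so the loop's result is exactly the same.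
def isqrtA (n : Int) : Int := (Nat.sqrt n.toNat : Int)

def is_Prime (n : Int) : Bool :=
  if n < 2 then false
  else aPrimeLoop n (PySem.List.pyRange 2 (isqrtA n + 1) 1)

-- itertools.combinations(nums, 2) / (nums, 3), in itertools order
def comb2A : List Int → List (Int × Int)
  | [] => []
  | x :: xs => xs.map (fun y => (x, y)) ++ comb2A xs

def comb3A : List Int → List (Int × Int × Int)
  | [] => []
  | x :: xs => (comb2A xs).map (fun p => (x, p.1, p.2)) ++ comb3A xs

def solution (nums : List Int) : Int :=
  let comb := comb3A nums
  let sum_comb := comb.map (fun t => t.1 + t.2.1 + t.2.2)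
  -- sum(1 for i in sum_comb if is_Prime(i))
  ((sum_comb.countP (fun i => is_Prime i) : Nat) : Int)

-- ===== PORT B =====
-- while d*d <= n: if n%d==0: return False; d += 1
def bPrimeLoop (n d : Int) : Bool :=
  if h : d * d ≤ n then
    (if n % d == 0 then false else bPrimeLoop n (d + 1))
  else true
termination_by (n + 1 - d).toNat
decreasing_by
  have hd : d ≤ n := by nlinarith [mul_self_nonneg d, mul_self_nonneg (d - 1)]
  omega

def bIsPrime (n : Int) : Bool :=
  if n < 2 then false else bPrimeLoop n 2

-- count_k(i, k, acc): k-combinations of nums[i:] whose sum plus acc is prime.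
-- 'if k < 0 then 0' is a totality guard only: count_k is never called with k < 0.
-- nums[j] is ported as pyGetD nums j 0: exact, since 0 ≤ i ≤ j ≤ len(nums) - k < len(nums).
def countKIdx (nums : List Int) (i k acc : Int) : Int :=
  if k == 0 then (if bIsPrime acc then 1 else 0)
  else if k < 0 then 0
  else
    (PySem.List.pyRange i ((nums.length : Int) - k + 1) 1).foldl
      (fun total j => total + countKIdx nums (j + 1) (k - 1) (acc + PySem.List.pyGetD nums j 0)) 0
termination_by k.toNat
decreasing_by simp_all; omega

def solution_alt (nums : List Int) : Int := countKIdx nums 0 3 0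

-- ===== PRECONDITION & SPEC =====
def Spec_solution (nums : List Int) (out : Int) : Prop := out = solution_alt nums
instance (nums : List Int) (out : Int) : Decidable (Spec_solution nums out) := by unfold Spec_solution; infer_instance

-- ===== CLAIM (what is proved, stated in full; the proofs are below) =====
def Claim_equal_solution : Prop := ∀ (nums : List Int), Dom_solution nums → Spec_solution nums (solution nums)

-- ===== LEMMAS AND PROOFS =====

-- proof-side helper: list-structured include/exclude recursion equal to countKIdx
def countK (lst : List Int) (k : Int) (acc : Int) : Int :=
  if k == 0 then (if bIsPrime acc then 1 else 0)
  else if (lst.length : Int) < k then 0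
  else
    match lst with
    | [] => 0
    | x :: rest => countK rest (k - 1) (acc + x) + countK rest k acc
termination_by lst.length
decreasing_by all_goals simp_all

lemma aPrimeLoop_eq_all (n : Int) (l : List Int) :
    aPrimeLoop n l = l.all (fun i => !(n % i == 0)) := by
  induction l with
  | nil => rfl
  | cons i rest ih =>
    simp only [aPrimeLoop, List.all_cons]
    by_cases h : n % i == 0 <;> simp [h, ih]

lemma toNat_sq (d : Int) (hd : 0 ≤ d) : (d * d).toNat = d.toNat * d.toNat :=
  Int.toNat_mul hd hd

lemma sq_le_imp_le_sqrt (n d : Int) (hd : 1 ≤ d) (h : d * d ≤ n) :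
    d ≤ (Nat.sqrt n.toNat : Int) := by
  have h1 : d.toNat * d.toNat ≤ n.toNat := by
    have h2 := toNat_sq d (by omega)
    have := Int.toNat_le_toNat h
    omega
  have := Nat.le_sqrt.mpr h1
  omega

lemma lt_sq_range_nil (n d : Int) (hd : 1 ≤ d) (hn : 0 ≤ n) (h : n < d * d) :
    PySem.List.pyRange d ((Nat.sqrt n.toNat : Int) + 1) 1 = [] := by
  apply PySem.List.pyRange_one_eq_nil
  have h1 : n.toNat < d.toNat * d.toNat := by
    have h2 := toNat_sq d (by omega)
    omega
  have := Nat.sqrt_lt.mpr h1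
  omega

lemma bPrimeLoop_eq_all_aux (m : Nat) : ∀ (n d : Int), (n + 1 - d).toNat ≤ m → 1 ≤ d → 0 ≤ n →
    bPrimeLoop n d = (PySem.List.pyRange d ((Nat.sqrt n.toNat : Int) + 1) 1).all
      (fun i => !(n % i == 0)) := by
  induction m with
  | zero =>
    intro n d hm hd hn
    rw [bPrimeLoop]
    by_cases h : d * d ≤ n
    · exfalso
      have : d ≤ n := by nlinarith [mul_self_nonneg (d - 1)]
      omega
    · rw [dif_neg h, lt_sq_range_nil n d hd hn (by omega)]
      rfl
  | succ m ih =>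
    intro n d hm hd hn
    rw [bPrimeLoop]
    by_cases h : d * d ≤ n
    · rw [dif_pos h]
      have hds := sq_le_imp_le_sqrt n d hd h
      rw [PySem.List.pyRange_one_cons (by omega)]
      simp only [List.all_cons]
      by_cases hdiv : n % d == 0
      · simp [hdiv]
      · rw [if_neg hdiv, ih n (d + 1) (by omega) (by omega) hn]
        simp [hdiv]
    · rw [dif_neg h, lt_sq_range_nil n d hd hn (by omega)]
      rfl

lemma is_Prime_eq_bIsPrime (n : Int) : is_Prime n = bIsPrime n := by
  unfold is_Prime bIsPrime isqrtA
  by_cases h : n < 2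
  · simp [h]
  · rw [if_neg h, if_neg h, aPrimeLoop_eq_all,
      bPrimeLoop_eq_all_aux (n + 1 - 2).toNat n 2 (le_refl _) (by omega) (by omega)]

lemma countK_zero (lst : List Int) (acc : Int) :
    countK lst 0 acc = if bIsPrime acc then 1 else 0 := by
  rw [countK.eq_def]; simp

lemma countK_one (lst : List Int) (acc : Int) :
    countK lst 1 acc = ((lst.countP (fun x => bIsPrime (acc + x)) : Nat) : Int) := by
  induction lst generalizing acc with
  | nil => rw [countK.eq_def]; simp
  | cons x rest ih =>
    rw [countK.eq_def]
    simp only [List.countP_cons]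
    norm_num
    rw [countK_zero, ih]
    by_cases h : bIsPrime (acc + x)
    · simp [h]; omega
    · simp [h]

lemma countK_two (lst : List Int) (acc : Int) :
    countK lst 2 acc = (((comb2A lst).countP (fun p => bIsPrime (acc + p.1 + p.2)) : Nat) : Int) := by
  induction lst generalizing acc with
  | nil => rw [countK.eq_def]; simp [comb2A]
  | cons x rest ih =>
    rw [countK.eq_def]
    match rest with
    | [] => simp [comb2A]
    | y :: rest' =>
      rw [if_neg (by norm_num), if_neg (by simp only [List.length_cons]; push_cast; omega)]
      norm_num
      rw [countK_one, ih]
      simp [comb2A, List.countP_append, List.countP_map, List.countP_cons, Function.comp_def]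
      omega

lemma countK_three (lst : List Int) (acc : Int) :
    countK lst 3 acc = (((comb3A lst).countP
      (fun t => bIsPrime (acc + t.1 + t.2.1 + t.2.2)) : Nat) : Int) := by
  induction lst generalizing acc with
  | nil => rw [countK.eq_def]; simp [comb3A]
  | cons x rest ih =>
    rw [countK.eq_def]
    match rest with
    | [] => simp [comb3A, comb2A]
    | [y] => norm_num [comb3A, comb2A]
    | y :: z :: rest' =>
      rw [if_neg (by norm_num), if_neg (by simp only [List.length_cons]; push_cast; omega)]
      norm_num
      rw [countK_two, ih]
      simp [comb3A, comb2A, List.countP_append, List.countP_map, List.countP_cons, Function.comp_def]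
      omega

lemma countK_short (lst : List Int) (k acc : Int) (hk : k ≠ 0) (hl : (lst.length : Int) < k) :
    countK lst k acc = 0 := by
  rw [countK.eq_def]
  rw [if_neg (by simpa using hk), if_pos hl]

-- the foldl of countKIdx as a sum, to peel one loop iteration at a time
lemma countKIdx_fold (nums : List Int) (i k acc : Int) (hk0 : ¬ (k == 0) = true) (hkn : ¬ k < 0) :
    countKIdx nums i k acc =
      ((PySem.List.pyRange i ((nums.length : Int) - k + 1) 1).map
        (fun j => countKIdx nums (j + 1) (k - 1) (acc + PySem.List.pyGetD nums j 0))).sum := by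
  rw [countKIdx.eq_def, if_neg hk0, if_neg hkn,
    PySem.List.foldl_add _ (fun j => countKIdx nums (j + 1) (k - 1) (acc + PySem.List.pyGetD nums j 0)) 0]
  simp

lemma countKIdx_inner (nums : List Int) (k : Int) (hk : 1 ≤ k)
    (IH : ∀ i acc : Int, 0 ≤ i →
      countKIdx nums i (k - 1) acc = countK (nums.drop i.toNat) (k - 1) acc) :
    ∀ (m : Nat) (i acc : Int), 0 ≤ i → ((nums.length : Int) - i).toNat ≤ m →
      countKIdx nums i k acc = countK (nums.drop i.toNat) k acc := by
  intro m
  induction m with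
  | zero =>
    intro i acc hi hm
    rw [countKIdx_fold nums i k acc (by simp; omega) (by omega),
      PySem.List.pyRange_one_eq_nil (by omega)]
    rw [countK_short _ k acc (by omega) (by simp; omega)]
    rfl
  | succ m ihm =>
    intro i acc hi hm
    rw [countKIdx_fold nums i k acc (by simp; omega) (by omega)]
    by_cases hle : (nums.length : Int) - k + 1 ≤ i
    · rw [PySem.List.pyRange_one_eq_nil hle]
      rw [countK_short _ k acc (by omega) (by simp; omega)]
      rfl
    · have hiL : i < (nums.length : Int) := by omega
      have hiN : i.toNat < nums.length := by omega
      rw [PySem.List.pyRange_one_cons (by omega), List.map_cons, List.sum_cons]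
      rw [← countKIdx_fold nums (i + 1) k acc (by simp; omega) (by omega)]
      rw [IH (i + 1) (acc + PySem.List.pyGetD nums i 0) (by omega)]
      rw [ihm (i + 1) acc (by omega) (by omega)]
      have hget : PySem.List.pyGetD nums i 0 = nums[i.toNat] :=
        PySem.List.pyGetD_eq_getElem nums 0 (by omega) (by omega)
      have hdrop : nums.drop i.toNat = nums[i.toNat] :: nums.drop (i.toNat + 1) :=
        List.drop_eq_getElem_cons hiN
      have hit : (i + 1).toNat = i.toNat + 1 := by omega
      rw [hget, hit, hdrop]
      conv_rhs => rw [countK.eq_def]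
      rw [if_neg (by simp; omega)]
      rw [if_neg (by simp only [List.length_cons, List.length_drop]; push_cast; omega)]

lemma countKIdx_eq_countK (nums : List Int) :
    ∀ (kt : Nat) (k i acc : Int), k.toNat = kt → 0 ≤ k → 0 ≤ i →
      countKIdx nums i k acc = countK (nums.drop i.toNat) k acc := by
  intro kt
  induction kt with
  | zero =>
    intro k i acc hkt hk hi
    have : k = 0 := by omega
    subst this
    rw [countKIdx.eq_def, countK.eq_def]
    simp
  | succ kt ih =>
    intro k i acc hkt hk hi
    have hk1 : 1 ≤ k := by omega
    exact countKIdx_inner nums k hk1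
      (fun i' acc' hi' => ih (k - 1) i' acc' (by omega) (by omega) hi')
      ((nums.length : Int) - i).toNat i acc hi (le_refl _)

-- ===== VERDICT (by name: the statement is the Claim_ definition above) =====
theorem solution_spec : Claim_equal_solution := by
  intro nums _
  unfold Spec_solution solution solution_alt
  rw [countKIdx_eq_countK nums 3 3 0 0 rfl (by omega) (by omega)]
  simp only [Int.toNat_zero, List.drop_zero]
  rw [countK_three]
  simp only [List.countP_map, Function.comp_def]
  congr 1
  apply List.countP_congr
  intro t _
  rw [is_Prime_eq_bIsPrime]
  norm_num
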